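-- pv_equiv track=rewrite | github.com/martinhenstridge/adventofcode2021 | aoc/day17.py | find_steps_within_targety
-- ===== SOURCE A (Python) =====
-- def find_steps_within_targety(targety, vy):
--     step = 0
--     y = 0
--     v = vy
--
--     # If initially moving upwards, skip to the point where we get back to y=0
--     # moving downwards. It takes vy steps moving upwards to decelerate to v=0,
--     # one step moving only in the x-direction at the peak where v=0, then vy
--     # more steps accelerating downwards to get back to y=0. The velocity for
--     # the next step after we get back to y=0 is vy+1, but facing downwards.
--     if vy > 0:
--         step = 1 + 2 * vy
--         v = -(vy + 1)
--
--     steps = []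
--     while y >= targety[0]:
--         if y <= targety[1]:
--             steps.append(step)
--         y += v
--         v -= 1
--         step += 1
--     return steps
-- ===== SOURCE B (Python) =====
-- def _isqrt(n):
--     # floor integer square root by binary search (n >= 0)
--     lo, hi = 0, n + 1
--     while hi - lo > 1:
--         mid = (lo + hi) // 2
--         if mid * mid <= n:
--             lo = mid
--         else:
--             hi = mid
--     return lo
--
--
-- def find_steps_within_targety(targety, vy):
--     lo, hi = targety[0], targety[1]
--     if lo > 0:
--         return []
--     # After the optional upward phase, the probe is at y=0 at step `step0`
--     # with downward velocity v0; after k more steps y(k) = k*v0 - k*(k-1)/2.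
--     if vy > 0:
--         step0 = 1 + 2 * vy
--         v0 = -(vy + 1)
--     else:
--         step0 = 0
--         v0 = vy
--     b = 2 * v0 + 1
--     # last simulated index: largest k with y(k) >= lo, i.e. k*k - b*k + 2*lo <= 0
--     K = (b + _isqrt(b * b - 8 * lo)) // 2
--     # first in-band index: smallest k with y(k) <= hi, i.e. k*k - b*k + 2*hi >= 0
--     if hi >= 0:
--         k1 = 0
--     else:
--         k1 = (b + _isqrt(b * b - 8 * hi)) // 2
--         if k1 * k1 - b * k1 + 2 * hi < 0:
--             k1 += 1
--     return list(range(step0 + k1, step0 + K + 1))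
-- ===== Notes on version B (the rewrite author's own statement) =====
-- stated objective: alternative
-- what changed: B replaces A's step-by-step simulation of the falling probe by a closed-form solution of the entry/exit quadratic y(k)=k*v0-k(k-1)/2 (integer square root via binary search), emitting the contiguous range of step numbers directly.
-- outside the precondition, e.g. on find_steps_within_targety((5,), 0): A returns [], B raises IndexError
import Mathlib
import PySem

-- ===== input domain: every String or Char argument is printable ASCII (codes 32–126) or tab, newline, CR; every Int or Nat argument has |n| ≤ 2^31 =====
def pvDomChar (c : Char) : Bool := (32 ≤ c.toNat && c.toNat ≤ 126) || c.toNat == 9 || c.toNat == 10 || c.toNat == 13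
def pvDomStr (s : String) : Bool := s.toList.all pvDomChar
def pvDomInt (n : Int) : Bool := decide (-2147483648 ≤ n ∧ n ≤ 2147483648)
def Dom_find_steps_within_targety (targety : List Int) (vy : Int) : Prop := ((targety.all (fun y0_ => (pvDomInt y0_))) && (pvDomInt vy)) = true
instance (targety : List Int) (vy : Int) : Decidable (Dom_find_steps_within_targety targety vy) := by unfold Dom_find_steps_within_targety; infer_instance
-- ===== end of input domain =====

-- B replaces A's step-by-step simulation of the falling probe by a closed-form
-- solution of the entry/exit quadratic (integer square root), emitting the
-- contiguous range of step numbers directly; objective: alternative algorithm.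

-- ===== PORT A =====
-- the 'while y >= targety[0]' loop of A, state (step, y, v, steps-accumulator);
-- the Nat fuel is exactly the proved termination measure (see pvLoopA_eq below),
-- it only makes the recursion structural and never cuts the loop short
def pvLoopAF : Nat → Int → Int → Int → Int → Int → List Int → List Int
  | 0, _, _, _, _, _, acc => acc
  | fuel + 1, lo, hi, step, y, v, acc =>
    if lo ≤ y then
      pvLoopAF fuel lo hi (step + 1) (y + v) (v - 1) (if y ≤ hi then acc ++ [step] else acc)
    else acc

def pvLoopA (lo hi step y v : Int) (acc : List Int) : List Int :=
  pvLoopAF ((v + 1) * (v + 1) + 2 * (y - lo) + 1).toNat lo hi step y v acc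

def find_steps_within_targety (targety : List Int) (vy : Int) : List Int :=
  match PySem.List.pyGet? targety 0, PySem.List.pyGet? targety 1 with
  | some lo, some hi =>
      if vy > 0 then pvLoopA lo hi (1 + 2 * vy) 0 (-(vy + 1)) []
      else pvLoopA lo hi 0 0 vy []
  | _, _ => []

-- ===== PORT B =====
-- Source B's _isqrt: binary search for the floor square root; the Nat fuel is the
-- interval width hi - lo, which strictly shrinks each iteration (a totality
-- guard only, it never changes the computed value)
def pvIsqrtLoopF : Nat → Int → Int → Int → Int
  | 0, _, lo, _ => lo
  | fuel + 1, n, lo, hi =>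
    if 1 < hi - lo then
      let mid := PySem.Int.floordiv (lo + hi) 2
      if mid * mid ≤ n then pvIsqrtLoopF fuel n mid hi else pvIsqrtLoopF fuel n lo mid
    else lo

def pvIsqrtLoop (n lo hi : Int) : Int := pvIsqrtLoopF (hi - lo).toNat n lo hi

def pvIsqrt (n : Int) : Int := pvIsqrtLoop n 0 (n + 1)

def find_steps_within_targety_alt (targety : List Int) (vy : Int) : List Int :=
  (PySem.List.pyGet? targety 0).elim [] (fun lo =>
    (PySem.List.pyGet? targety 1).elim [] (fun hi =>
      if 0 < lo then []
      else
        let step0 : Int := if 0 < vy then 1 + 2 * vy else 0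
        let v0 : Int := if 0 < vy then -(vy + 1) else vy
        let b := 2 * v0 + 1
        let K := PySem.Int.floordiv (b + pvIsqrt (b * b - 8 * lo)) 2
        let k1 : Int :=
          if 0 ≤ hi then 0
          else
            let c := PySem.Int.floordiv (b + pvIsqrt (b * b - 8 * hi)) 2
            if c * c - b * c + 2 * hi < 0 then c + 1 else c
        PySem.List.pyRange (step0 + k1) (step0 + K + 1) 1))

-- ===== PRECONDITION & SPEC =====
-- Pre_ excludes lists with fewer than two elements: there A raises IndexError
-- as soon as the loop body runs (and B raises IndexError immediately).
def Pre_find_steps_within_targety (targety : List Int) (_vy : Int) : Prop :=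
  2 ≤ targety.length
instance (targety : List Int) (vy : Int) : Decidable (Pre_find_steps_within_targety targety vy) := by
  unfold Pre_find_steps_within_targety; infer_instance
def pvWitness_find_steps_within_targety : List Int × Int := ([-10, -5], 3)

def Spec_find_steps_within_targety (targety : List Int) (vy : Int) (out : List Int) : Prop := out = find_steps_within_targety_alt targety vy
instance (targety : List Int) (vy : Int) (out : List Int) : Decidable (Spec_find_steps_within_targety targety vy out) := by unfold Spec_find_steps_within_targety; infer_instance

-- ===== CLAIM (what is proved, stated in full; the proofs are below) =====
def Claim_equal_find_steps_within_targety : Prop := ∀ (targety : List Int) (vy : Int), Dom_find_steps_within_targety targety vy → Pre_find_steps_within_targety targety vy → Spec_find_steps_within_targety targety vy (find_steps_within_targety targety vy)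

-- ===== LEMMAS AND PROOFS =====

-- position after k further steps from state (y, v): y, y+v, y+v+(v-1), …
def pvYAt (y v : Int) : Nat → Int
  | 0 => y
  | k + 1 => pvYAt y v k + (v - k)

lemma pvYAt_shift (y v : Int) (k : Nat) :
    pvYAt (y + v) (v - 1) k = pvYAt y v (k + 1) := by
  induction k with
  | zero => simp [pvYAt]
  | succ k ih => simp only [pvYAt, ih]; push_cast; ring

lemma pvYAt_anti (y v : Int) (hv : v ≤ 0) {j k : Nat} (h : j ≤ k) :
    pvYAt y v k ≤ pvYAt y v j := by
  induction h with
  | refl => exact le_refl _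
  | @step k h ih =>
      calc pvYAt y v (k + 1) = pvYAt y v k + (v - k) := rfl
        _ ≤ pvYAt y v k := by have : (0:Int) ≤ (k:Int) := Int.natCast_nonneg k; omega
        _ ≤ pvYAt y v j := ih

lemma two_pvYAt (y v : Int) (k : Nat) :
    2 * pvYAt y v k = 2 * y + 2 * k * v - k * (k - 1) := by
  induction k with
  | zero => simp [pvYAt]
  | succ k ih => simp only [pvYAt]; push_cast at ih ⊢; ring_nf; ring_nf at ih; linarith

-- one unfolding of A's loop: the fuel is exactly the termination measure
lemma pvLoopA_eq (lo hi step y v : Int) (acc : List Int) :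
    pvLoopA lo hi step y v acc =
      if lo ≤ y then
        pvLoopA lo hi (step + 1) (y + v) (v - 1) (if y ≤ hi then acc ++ [step] else acc)
      else acc := by
  have h2 : 0 ≤ (v + 1) * (v + 1) := mul_self_nonneg _
  have h3 : 0 ≤ (v - 1 + 1) * (v - 1 + 1) := mul_self_nonneg _
  have h1 : (v - 1 + 1) * (v - 1 + 1) + 2 * (y + v - lo) + 1 + 1
      = (v + 1) * (v + 1) + 2 * (y - lo) + 1 := by ring
  unfold pvLoopA
  by_cases hy : lo ≤ y
  · have hm : ((v + 1) * (v + 1) + 2 * (y - lo) + 1).toNat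
        = ((v - 1 + 1) * (v - 1 + 1) + 2 * (y + v - lo) + 1).toNat + 1 := by
      generalize hA : (v - 1 + 1) * (v - 1 + 1) = A at *
      generalize hB : (v + 1) * (v + 1) = B at *
      omega
    rw [hm]
    simp only [pvLoopAF]
  · rw [if_neg hy]
    cases hfe : ((v + 1) * (v + 1) + 2 * (y - lo) + 1).toNat with
    | zero => simp [pvLoopAF]
    | succ m => simp [pvLoopAF, hy]

-- A's loop emits the contiguous range of step numbers [step+k1, step+K]
lemma pvLoopA_range (lo hi : Int) : ∀ (K k1 : Nat) (y v step : Int) (acc : List Int),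
    (∀ j : Nat, j ≤ K → lo ≤ pvYAt y v j) →
    pvYAt y v (K + 1) < lo →
    (∀ j : Nat, k1 ≤ j → pvYAt y v j ≤ hi) →
    (∀ j : Nat, j < k1 → hi < pvYAt y v j) →
    pvLoopA lo hi step y v acc
      = acc ++ PySem.List.pyRange (step + (k1 : Int)) (step + (K : Int) + 1) 1 := by
  intro K
  induction K with
  | zero =>
    intro k1 y v step acc hall hK1 hband hpre
    have hy : lo ≤ y := hall 0 (le_refl _)
    have hy1 : y + v < lo := by
      have := hK1; simp only [pvYAt] at this; push_cast at this; omega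
    rw [pvLoopA_eq, if_pos hy, pvLoopA_eq, if_neg (by omega)]
    cases k1 with
    | zero =>
      have hhi : y ≤ hi := hband 0 (le_refl _)
      rw [if_pos hhi]
      have : PySem.List.pyRange (step + ((0:Nat) : Int)) (step + ((0:Nat) : Int) + 1) 1 = [step] := by
        push_cast
        simpa using PySem.List.pyRange_one_singleton step
      rw [this]
    | succ m =>
      have hhi : hi < y := hpre 0 (Nat.succ_pos m)
      rw [if_neg (by omega)]
      have : PySem.List.pyRange (step + ((m + 1 : Nat) : Int)) (step + ((0:Nat) : Int) + 1) 1 = [] := by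
        apply PySem.List.pyRange_one_eq_nil
        push_cast
        omega
      rw [this, List.append_nil]
  | succ K ih =>
    intro k1 y v step acc hall hK1 hband hpre
    have hy : lo ≤ y := hall 0 (Nat.zero_le _)
    rw [pvLoopA_eq, if_pos hy]
    cases k1 with
    | zero =>
      have hhi : y ≤ hi := hband 0 (le_refl _)
      rw [if_pos hhi]
      rw [ih 0 (y + v) (v - 1) (step + 1) (acc ++ [step])
        (fun j hj => by rw [pvYAt_shift]; exact hall (j + 1) (by omega))
        (by rw [pvYAt_shift]; exact hK1)
        (fun j _ => by rw [pvYAt_shift]; exact hband (j + 1) (Nat.zero_le _))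
        (fun j hj => absurd hj (Nat.not_lt_zero j))]
      have hcons : PySem.List.pyRange (step + ((0:Nat) : Int)) (step + ((K + 1 : Nat) : Int) + 1) 1
          = step :: PySem.List.pyRange (step + 1) (step + ((K + 1 : Nat) : Int) + 1) 1 := by
        push_cast
        rw [add_zero]
        exact PySem.List.pyRange_one_cons (by push_cast; omega)
      rw [hcons]
      simp only [List.append_assoc, List.singleton_append]
      have e1 : step + 1 + ((0:Nat) : Int) = step + 1 := by push_cast; ring
      have e2 : step + 1 + (K : Int) + 1 = step + ((K + 1 : Nat) : Int) + 1 := by push_cast; ring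
      rw [e1, e2]
    | succ m =>
      have hhi : hi < y := hpre 0 (Nat.succ_pos m)
      rw [if_neg (by omega)]
      rw [ih m (y + v) (v - 1) (step + 1) acc
        (fun j hj => by rw [pvYAt_shift]; exact hall (j + 1) (by omega))
        (by rw [pvYAt_shift]; exact hK1)
        (fun j hj => by rw [pvYAt_shift]; exact hband (j + 1) (by omega))
        (fun j hj => by rw [pvYAt_shift]; exact hpre (j + 1) (by omega))]
      congr 2
      · push_cast; omega
      · push_cast; omega

lemma pvIsqrtLoopF_spec : ∀ (fuel : Nat) (n lo hi : Int), (hi - lo).toNat ≤ fuel →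
    0 ≤ lo → lo * lo ≤ n → n < hi * hi → lo < hi →
    0 ≤ pvIsqrtLoopF fuel n lo hi ∧ pvIsqrtLoopF fuel n lo hi * pvIsqrtLoopF fuel n lo hi ≤ n ∧
      n < (pvIsqrtLoopF fuel n lo hi + 1) * (pvIsqrtLoopF fuel n lo hi + 1) := by
  intro fuel
  induction fuel with
  | zero => intro n lo hi hm h0 h1 h2 h3; omega
  | succ fuel ih =>
    intro n lo hi hm h0 h1 h2 h3
    have hmid : PySem.Int.floordiv (lo + hi) 2 = (lo + hi) / 2 :=
      PySem.Int.floordiv_eq_ediv_of_pos (by norm_num)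
    simp only [pvIsqrtLoopF, hmid]
    split_ifs with hgt hsq
    · exact ih n _ hi (by omega) (by omega) hsq h2 (by omega)
    · exact ih n lo _ (by omega) h0 h1 (not_le.mp hsq) (by omega)
    · have hhi : hi = lo + 1 := by omega
      subst hhi
      exact ⟨h0, h1, h2⟩

lemma pvIsqrt_spec (n : Int) (hn : 0 ≤ n) :
    0 ≤ pvIsqrt n ∧ pvIsqrt n * pvIsqrt n ≤ n ∧ n < (pvIsqrt n + 1) * (pvIsqrt n + 1) := by
  unfold pvIsqrt
  unfold pvIsqrtLoop
  exact pvIsqrtLoopF_spec _ n 0 (n + 1) (by omega) le_rfl (by simpa) (by nlinarith) (by omega)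

-- floor-division bracket for //2
lemma pvFd2 (a : Int) : 2 * PySem.Int.floordiv a 2 ≤ a ∧ a < 2 * PySem.Int.floordiv a 2 + 2 := by
  rw [PySem.Int.floordiv_eq_ediv_of_pos (by norm_num : (0:Int) < 2)]
  omega

-- the arithmetic core: the loop from the post-peak state equals B's range
-- abbreviation for B's floor of the larger quadratic root (proof-side only)
def pvK (v0 w : Int) : Int :=
  PySem.Int.floordiv (2 * v0 + 1 + pvIsqrt ((2 * v0 + 1) * (2 * v0 + 1) - 8 * w)) 2

lemma pvQuad (v0 t w : Int) (ht : 0 ≤ t) :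
    t * t - (2 * v0 + 1) * t + 2 * w = 2 * w - 2 * pvYAt 0 v0 t.toNat := by
  have h2y := two_pvYAt 0 v0 t.toNat
  rw [Int.toNat_of_nonneg ht] at h2y
  rw [h2y]
  ring

lemma pvK_spec (v0 w : Int) (hw : w ≤ 0) (hv0 : v0 ≤ 0) :
    0 ≤ pvK v0 w ∧
    pvK v0 w * pvK v0 w - (2 * v0 + 1) * pvK v0 w + 2 * w ≤ 0 ∧
    0 < (pvK v0 w + 1) * (pvK v0 w + 1) - (2 * v0 + 1) * (pvK v0 w + 1) + 2 * w := by
  have hq : 0 ≤ v0 * (v0 + 1) := by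
    rcases lt_or_eq_of_le hv0 with h | h
    · have h2 := mul_nonneg (a := -v0) (b := -(v0 + 1)) (by omega) (by omega)
      have he : -v0 * -(v0 + 1) = v0 * (v0 + 1) := by ring
      linarith
    · rw [h]; norm_num
  have hbb : (2 * v0 + 1) * (2 * v0 + 1) = 4 * (v0 * (v0 + 1)) + 1 := by ring
  have hD1 : 1 ≤ (2 * v0 + 1) * (2 * v0 + 1) - 8 * w := by linarith
  obtain ⟨hs0, hs1, hs2⟩ := pvIsqrt_spec ((2 * v0 + 1) * (2 * v0 + 1) - 8 * w) (by linarith)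
  simp only [pvK]
  set s := pvIsqrt ((2 * v0 + 1) * (2 * v0 + 1) - 8 * w) with hs
  have hs1' : 1 ≤ s := by
    by_contra hcon
    have h0 : s = 0 := by omega
    rw [h0] at hs2
    norm_num at hs2
    linarith
  have hsb : -(2 * v0 + 1) ≤ s := by
    by_cases hb : 0 ≤ 2 * v0 + 1
    · linarith
    · by_contra hcon
      have h1 : s + 1 ≤ -(2 * v0 + 1) := by omega
      have h2 : (s + 1) * (s + 1) ≤ -(2 * v0 + 1) * -(2 * v0 + 1) :=
        mul_self_le_mul_self (by linarith) h1
      have h3 : -(2 * v0 + 1) * -(2 * v0 + 1) = (2 * v0 + 1) * (2 * v0 + 1) := by ring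
      linarith
  obtain ⟨hf1, hf2⟩ := pvFd2 (2 * v0 + 1 + s)
  set K := PySem.Int.floordiv (2 * v0 + 1 + s) 2 with hK
  have hK0 : 0 ≤ K := by omega
  have hu0 : 0 ≤ 2 * K - (2 * v0 + 1) := by omega
  have hus : 2 * K - (2 * v0 + 1) ≤ s := by omega
  refine ⟨hK0, ?_, ?_⟩
  · have h2 : (2 * K - (2 * v0 + 1)) * (2 * K - (2 * v0 + 1)) ≤ s * s :=
      mul_self_le_mul_self hu0 hus
    have hexp : (2 * K - (2 * v0 + 1)) * (2 * K - (2 * v0 + 1))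
        = 4 * (K * K) - 4 * ((2 * v0 + 1) * K) + (2 * v0 + 1) * (2 * v0 + 1) := by ring
    linarith
  · have h1 : s + 1 ≤ 2 * (K + 1) - (2 * v0 + 1) := by omega
    have h2 : (s + 1) * (s + 1) ≤ (2 * (K + 1) - (2 * v0 + 1)) * (2 * (K + 1) - (2 * v0 + 1)) :=
      mul_self_le_mul_self (by linarith) h1
    have hexp : (2 * (K + 1) - (2 * v0 + 1)) * (2 * (K + 1) - (2 * v0 + 1))
        = 4 * ((K + 1) * (K + 1)) - 4 * ((2 * v0 + 1) * (K + 1)) + (2 * v0 + 1) * (2 * v0 + 1) := by ring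
    linarith

lemma pvK_prev (v0 w : Int) (hw : w ≤ -1) (hv0 : v0 ≤ 0) (_hK1 : 1 ≤ pvK v0 w) :
    (pvK v0 w - 1) * (pvK v0 w - 1) - (2 * v0 + 1) * (pvK v0 w - 1) + 2 * w < 0 := by
  have hq : 0 ≤ v0 * (v0 + 1) := by
    rcases lt_or_eq_of_le hv0 with h | h
    · have h2 := mul_nonneg (a := -v0) (b := -(v0 + 1)) (by omega) (by omega)
      have he : -v0 * -(v0 + 1) = v0 * (v0 + 1) := by ring
      linarith
    · rw [h]; norm_num
  have hbb : (2 * v0 + 1) * (2 * v0 + 1) = 4 * (v0 * (v0 + 1)) + 1 := by ring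
  have hD9 : 9 ≤ (2 * v0 + 1) * (2 * v0 + 1) - 8 * w := by linarith
  obtain ⟨hs0, hs1, hs2⟩ := pvIsqrt_spec ((2 * v0 + 1) * (2 * v0 + 1) - 8 * w) (by linarith)
  simp only [pvK]
  set s := pvIsqrt ((2 * v0 + 1) * (2 * v0 + 1) - 8 * w) with hs
  have hs3 : 3 ≤ s := by
    by_contra hcon
    have h2 : s + 1 ≤ 3 := by omega
    have h3 : (s + 1) * (s + 1) ≤ 3 * 3 := mul_self_le_mul_self (by omega) h2
    linarith
  obtain ⟨hf1, hf2⟩ := pvFd2 (2 * v0 + 1 + s)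
  set K := PySem.Int.floordiv (2 * v0 + 1 + s) 2 with hK
  have hu3a : s - 3 ≤ 2 * (K - 1) - (2 * v0 + 1) := by omega
  have hu3b : 2 * (K - 1) - (2 * v0 + 1) ≤ s - 2 := by omega
  have h2 : (2 * (K - 1) - (2 * v0 + 1)) * (2 * (K - 1) - (2 * v0 + 1)) ≤ (s - 2) * (s - 2) :=
    mul_self_le_mul_self (by omega) hu3b
  have h3 : (s - 2) * (s - 2) = s * s - 4 * s + 4 := by ring
  have hexp : (2 * (K - 1) - (2 * v0 + 1)) * (2 * (K - 1) - (2 * v0 + 1))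
      = 4 * ((K - 1) * (K - 1)) - 4 * ((2 * v0 + 1) * (K - 1)) + (2 * v0 + 1) * (2 * v0 + 1) := by ring
  linarith

lemma pvCore (lo hi step0 v0 : Int) (hlo : lo ≤ 0) (hv0 : v0 ≤ 0) :
    pvLoopA lo hi step0 0 v0 [] =
      PySem.List.pyRange
        (step0 + (if 0 ≤ hi then 0 else
          (if pvK v0 hi * pvK v0 hi - (2 * v0 + 1) * pvK v0 hi + 2 * hi < 0
           then pvK v0 hi + 1 else pvK v0 hi)))
        (step0 + pvK v0 lo + 1) 1 := by
  obtain ⟨hK0, hKle, hKgt⟩ := pvK_spec v0 lo hlo hv0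
  have hKn : ((pvK v0 lo).toNat : Int) = pvK v0 lo := Int.toNat_of_nonneg hK0
  have hfloor : lo ≤ pvYAt 0 v0 (pvK v0 lo).toNat := by
    have hquad := pvQuad v0 (pvK v0 lo) lo hK0
    rw [hquad] at hKle
    linarith
  have hstop : pvYAt 0 v0 ((pvK v0 lo).toNat + 1) < lo := by
    have hquad := pvQuad v0 (pvK v0 lo + 1) lo (by omega)
    have ht : (pvK v0 lo + 1).toNat = (pvK v0 lo).toNat + 1 := by omega
    rw [ht] at hquad
    rw [hquad] at hKgt
    linarith
  have hall : ∀ j : Nat, j ≤ (pvK v0 lo).toNat → lo ≤ pvYAt 0 v0 j :=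
    fun j hj => le_trans hfloor (pvYAt_anti 0 v0 hv0 hj)
  by_cases hhi : 0 ≤ hi
  · rw [if_pos hhi]
    rw [pvLoopA_range lo hi (pvK v0 lo).toNat 0 0 v0 step0 [] hall hstop
      (fun j _ => by
        have h1 : pvYAt 0 v0 j ≤ pvYAt 0 v0 0 := pvYAt_anti 0 v0 hv0 (Nat.zero_le j)
        simp only [pvYAt] at h1
        linarith)
      (fun j hj => absurd hj (Nat.not_lt_zero j))]
    rw [List.nil_append, hKn]
    norm_num
  · rw [if_neg hhi]
    obtain ⟨hc0, hcle, hcgt⟩ := pvK_spec v0 hi (by omega) hv0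
    have hcn : ((pvK v0 hi).toNat : Int) = pvK v0 hi := Int.toNat_of_nonneg hc0
    by_cases hadj : pvK v0 hi * pvK v0 hi - (2 * v0 + 1) * pvK v0 hi + 2 * hi < 0
    · rw [if_pos hadj]
      have hk1n : ((pvK v0 hi + 1).toNat : Int) = pvK v0 hi + 1 := by omega
      have hband : ∀ j : Nat, (pvK v0 hi + 1).toNat ≤ j → pvYAt 0 v0 j ≤ hi := by
        intro j hj
        have hquad := pvQuad v0 (pvK v0 hi + 1) hi (by omega)
        rw [hquad] at hcgt
        exact le_trans (pvYAt_anti 0 v0 hv0 hj) (by linarith)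
      have hpre : ∀ j : Nat, j < (pvK v0 hi + 1).toNat → hi < pvYAt 0 v0 j := by
        intro j hj
        have hquad := pvQuad v0 (pvK v0 hi) hi hc0
        rw [hquad] at hadj
        have hjc : j ≤ (pvK v0 hi).toNat := by omega
        exact lt_of_lt_of_le (by linarith) (pvYAt_anti 0 v0 hv0 hjc)
      rw [pvLoopA_range lo hi (pvK v0 lo).toNat (pvK v0 hi + 1).toNat 0 v0 step0 [] hall hstop hband hpre]
      rw [List.nil_append, hKn, hk1n]
    · rw [if_neg hadj]
      have hyc : pvYAt 0 v0 (pvK v0 hi).toNat ≤ hi := by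
        have hquad := pvQuad v0 (pvK v0 hi) hi hc0
        rw [hquad] at hadj
        linarith [not_lt.mp hadj]
      have hband : ∀ j : Nat, (pvK v0 hi).toNat ≤ j → pvYAt 0 v0 j ≤ hi :=
        fun j hj => le_trans (pvYAt_anti 0 v0 hv0 hj) hyc
      have hpre : ∀ j : Nat, j < (pvK v0 hi).toNat → hi < pvYAt 0 v0 j := by
        intro j hj
        have hc1 : 1 ≤ pvK v0 hi := by omega
        have hprev := pvK_prev v0 hi (by omega) hv0 hc1
        have hquad := pvQuad v0 (pvK v0 hi - 1) hi (by omega)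
        rw [hquad] at hprev
        have hjc : j ≤ (pvK v0 hi - 1).toNat := by omega
        have ht : (pvK v0 hi - 1).toNat = (pvK v0 hi).toNat - 1 := by omega
        exact lt_of_lt_of_le (by linarith) (pvYAt_anti 0 v0 hv0 hjc)
      rw [pvLoopA_range lo hi (pvK v0 lo).toNat (pvK v0 hi).toNat 0 v0 step0 [] hall hstop hband hpre]
      rw [List.nil_append, hKn, hcn]

-- ===== VERDICT (by name: the statement is the Claim_ definition above) =====
theorem find_steps_within_targety_spec : Claim_equal_find_steps_within_targety := by
  intro targety vy _ hpre
  unfold Spec_find_steps_within_targety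
  unfold Pre_find_steps_within_targety at hpre
  rcases targety with _ | ⟨t0, rest⟩
  · simp at hpre
  rcases rest with _ | ⟨t1, rest⟩
  · simp at hpre
  have hg0 : PySem.List.pyGet? (t0 :: t1 :: rest) 0 = some t0 :=
    PySem.List.pyGet?_zero_cons t0 (t1 :: rest)
  have hg1 : PySem.List.pyGet? (t0 :: t1 :: rest) 1 = some t1 := by
    have h1 : PySem.List.pyGet? (t0 :: t1 :: rest) (((0 : Nat) : Int) + 1)
        = PySem.List.pyGet? (t1 :: rest) ((0 : Nat) : Int) :=
      PySem.List.pyGet?_cons_succ t0 (t1 :: rest) 0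
    simpa using h1
  simp only [find_steps_within_targety, find_steps_within_targety_alt, hg0, hg1, Option.elim]
  by_cases h0 : 0 < t0
  · rw [if_pos h0]
    by_cases hvy : 0 < vy
    · rw [if_pos hvy, pvLoopA_eq, if_neg (by omega)]
    · rw [if_neg hvy, pvLoopA_eq, if_neg (by omega)]
  · rw [if_neg h0]
    by_cases hvy : 0 < vy
    · rw [if_pos hvy, if_pos hvy, if_pos hvy]
      have hcore := pvCore t0 t1 (1 + 2 * vy) (-(vy + 1)) (by omega) (by omega)
      simp only [pvK] at hcore
      exact hcore
    · rw [if_neg hvy, if_neg hvy, if_neg hvy]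
      have hcore := pvCore t0 t1 0 vy (by omega) (by omega)
      simp only [pvK] at hcore
      exact hcore
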